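-- pv_equiv track=rewrite | github.com/yunwilliamyu/jax-genomic-assembler | library.py | int_to_16mer
-- ===== SOURCE A (Python) =====
-- def int_to_16mer(x):
--   '''Converts an integer to a 16-mer. Assumes that the integer is in range [0, 2**32)'''
--   def pair_to_base(b):
--     '''Converts binary pair to base'''
--     if b=='00':
--       return 'A'
--     elif b=='01':
--       return 'C'
--     elif b=='10':
--       return 'G'
--     elif b=='11':
--       return 'T'
--     else:
--       raise ValueError('Invalid binary pair' + str(b))
--   x = x % 4**16
--   x_bin = str(bin(x))[2:]
--   x_bin = '0'*(32-len(x_bin)) + x_bin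
--   x_bin = list(x_bin)
--   return ''.join([pair_to_base(''.join(y)) for y in zip(x_bin[::2], x_bin[1::2])])
-- ===== SOURCE B (Python) =====
-- def int_to_16mer(x):
--   '''Converts an integer to a 16-mer. Assumes that the integer is in range [0, 2**32)'''
--   x = x % 4**16
--   return ''.join("ACGT"[(x >> (30 - 2*i)) & 3] for i in range(16))
-- ===== Notes on version B (the rewrite author's own statement) =====
-- stated objective: idiomatic
-- what changed: B extracts each two-bit code directly from the integer by shifting and masking and indexes into "ACGT", instead of formatting a zero-padded binary string, zipping two strided slices and decoding each digit pair with an if/elif chain.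
import Mathlib
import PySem

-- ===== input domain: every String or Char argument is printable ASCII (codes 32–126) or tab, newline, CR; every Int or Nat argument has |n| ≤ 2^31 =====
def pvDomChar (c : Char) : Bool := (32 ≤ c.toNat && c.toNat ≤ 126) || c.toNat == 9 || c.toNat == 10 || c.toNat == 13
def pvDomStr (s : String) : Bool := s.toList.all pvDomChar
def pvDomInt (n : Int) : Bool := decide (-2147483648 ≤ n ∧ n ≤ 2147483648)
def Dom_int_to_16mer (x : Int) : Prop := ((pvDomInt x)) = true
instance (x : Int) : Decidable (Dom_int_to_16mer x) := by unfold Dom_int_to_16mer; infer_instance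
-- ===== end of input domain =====

-- B replaces A's padded binary string + zipped slices + if/elif pair decoding by direct
-- shift-and-mask extraction of each 2-bit code, indexing into "ACGT" (idiomatic, same cost).

-- ===== PORT A =====
-- inner helper pair_to_base; the final 'else' raises ValueError in Python and is
-- unreachable for the '0'/'1' pairs produced below, ported as ""
def pairToBase (b : String) : String :=
  if b = "00" then "A"
  else if b = "01" then "C"
  else if b = "10" then "G"
  else if b = "11" then "T"
  else ""

def int_to_16mer (x : Int) : String :=
  -- x = x % 4**16
  let x1 := PySem.Int.mod x (4 ^ 16)
  -- x_bin = str(bin(x))[2:]  (kept as the code-point list; list(x_bin) is taken below anyway)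
  let xbin1 : List Char := PySem.Chars.slice (PySem.Int.pyBin x1).toList (some 2) none
  -- x_bin = '0'*(32-len(x_bin)) + x_bin; Python's negative string repeat gives '' just as Nat subtraction clamps
  let xbin2 : List Char := List.replicate (32 - xbin1.length) '0' ++ xbin1
  -- x_bin[::2] and x_bin[1::2]; step 2 ≠ 0 so slice? never returns none
  let ev := (PySem.List.slice? xbin2 none none 2).getD []
  let od := (PySem.List.slice? xbin2 (some 1) none 2).getD []
  -- ''.join([pair_to_base(''.join(y)) for y in zip(...)]); ''.join of a pair of chars is the 2-char string
  PySem.Str.join "" ((ev.zip od).map (fun y => pairToBase (String.ofList [y.1, y.2])))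

-- ===== PORT B =====
def int_to_16mer_alt (x : Int) : String :=
  -- x = x % 4**16
  let m := PySem.Int.mod x (4 ^ 16)
  -- ''.join("ACGT"[(x >> (30 - 2*i)) & 3] for i in range(16)); 30-2*i ≥ 0 on range(16) so .toNat is exact,
  -- and the index (… & 3) is always in [0,4) so pyGet? never returns none
  PySem.Str.join "" ((PySem.List.pyRange 0 16 1).map (fun i =>
    String.ofList [(PySem.Str.pyGet? "ACGT" (PySem.Int.band (m >>> (30 - 2 * i).toNat) 3)).getD ' ']))

-- ===== PRECONDITION & SPEC =====
def Spec_int_to_16mer (x : Int) (out : String) : Prop := out = int_to_16mer_alt x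
instance (x : Int) (out : String) : Decidable (Spec_int_to_16mer x out) := by unfold Spec_int_to_16mer; infer_instance

-- ===== CLAIM (what is proved, stated in full; the proofs are below) =====
def Claim_equal_int_to_16mer : Prop := ∀ (x : Int), Dom_int_to_16mer x → Spec_int_to_16mer x (int_to_16mer x)

-- ===== LEMMAS AND PROOFS =====
def binNat (m : Nat) : List Char :=
  if _h : m < 2 then [Nat.digitChar m]
  else binNat (m / 2) ++ [Nat.digitChar (m % 2)]
decreasing_by exact Nat.div_lt_self (by omega) (by omega)

theorem toDigitsCore_eq (f : Nat) : ∀ (m : Nat) (l : List Char), m < f →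
    Nat.toDigitsCore 2 f m l = binNat m ++ l := by
  induction f with
  | zero => intro m l h; omega
  | succ f ih =>
    intro m l h
    rw [Nat.toDigitsCore]
    by_cases h2 : m / 2 = 0
    · have hm : m < 2 := by omega
      rw [binNat]
      simp [hm, Nat.mod_eq_of_lt hm, h2]
    · have hdiv : m / 2 < f := by omega
      rw [if_neg h2, ih (m/2) _ hdiv]
      conv_rhs => rw [binNat]
      have hm : ¬ m < 2 := by omega
      simp [hm]

theorem toDigits_eq_binNat (m : Nat) : Nat.toDigits 2 m = binNat m := by
  rw [Nat.toDigits, toDigitsCore_eq _ m [] (by omega), List.append_nil]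

def fbits : Nat → Nat → List Char
  | 0, _ => []
  | (k+1), m => Nat.digitChar ((m >>> k) % 2) :: fbits k m
theorem fbits_zero (k : Nat) : fbits k 0 = List.replicate k '0' := by
  induction k with
  | zero => rfl
  | succ k ih => simp [fbits, ih, List.replicate_succ, Nat.digitChar]

theorem fbits_succ (k m : Nat) : fbits (k+1) m = fbits k (m / 2) ++ [Nat.digitChar (m % 2)] := by
  induction k generalizing m with
  | zero => simp [fbits]
  | succ k ih =>
    have hsh : m >>> (k+1) = (m/2) >>> k := by
      rw [show k+1 = 1+k by omega, Nat.shiftRight_add, Nat.shiftRight_one]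
    rw [fbits, ih, fbits, hsh]
    simp

theorem pad_eq_fbits : ∀ (k m : Nat), 1 ≤ k → m < 2 ^ k →
    List.replicate (k - (binNat m).length) '0' ++ binNat m = fbits k m := by
  intro k
  induction k with
  | zero => omega
  | succ k ih =>
    intro m _ hm
    by_cases h2 : m < 2
    · rw [binNat]
      simp only [h2, dif_pos]
      rcases Nat.eq_or_lt_of_le (Nat.one_le_iff_ne_zero.mpr (by omega : k + 1 ≠ 0)) with h | h
      · have hk0 : k = 0 := by omega
        subst hk0
        show _ = fbits (0+1) m
        rw [fbits]
        simp [fbits, Nat.mod_eq_of_lt h2]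
      · -- k ≥ 1
        rw [fbits_succ, Nat.div_eq_of_lt h2, fbits_zero, Nat.mod_eq_of_lt h2]
        simp
    · rw [binNat, dif_neg h2]
      have hk : 1 ≤ k := by
        by_contra h
        have : k = 0 := by omega
        subst this; simp at hm; omega
      have hlt : m / 2 < 2 ^ k := by
        rw [Nat.div_lt_iff_lt_mul (by omega : 0 < 2)]
        calc m < 2 ^ (k+1) := hm
        _ = 2 ^ k * 2 := by ring
      rw [fbits_succ]
      rw [← ih (m/2) hk hlt]
      rw [List.length_append]
      simp only [List.length_singleton]
      have : k + 1 - ((binNat (m / 2)).length + 1) = k - (binNat (m / 2)).length := by omega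
      rw [this, List.append_assoc]

def evens {α : Type} : List α → List α
  | [] => []
  | [a] => [a]
  | a :: _ :: l => a :: evens l
def odds {α : Type} : List α → List α
  | [] => []
  | [_] => []
  | _ :: b :: l => b :: odds l

theorem filterMap_evens {α : Type} (xs : List α) :
    List.filterMap (fun k : Nat => xs[2*k]?) (List.range ((xs.length+1)/2)) = evens xs := by
  induction xs using evens.induct with
  | case1 => simp [evens]
  | case2 a => simp [evens]
  | case3 a b l ih =>
    have hlen : ((a :: b :: l).length + 1) / 2 = (l.length+1)/2 + 1 := by
      simp [List.length_cons]; omega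
    rw [hlen, List.range_succ_eq_map, List.filterMap_cons, List.filterMap_map]
    simp only [evens, Nat.mul_zero, List.getElem?_cons_zero]
    rw [← ih]
    refine congrArg (a :: ·) ?_
    apply List.filterMap_congr
    intro k _
    have h2 : 2 * (k+1) = (2*k) + 2 := by ring
    simp [Function.comp, Nat.succ_eq_add_one, h2]

theorem filterMap_odds {α : Type} (xs : List α) :
    List.filterMap (fun k : Nat => xs[2*k+1]?) (List.range (xs.length/2)) = odds xs := by
  induction xs using odds.induct with
  | case1 => simp [odds]
  | case2 a => simp [odds]
  | case3 a b l ih =>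
    have hlen : (a :: b :: l).length / 2 = l.length/2 + 1 := by
      simp [List.length_cons]; omega
    rw [hlen, List.range_succ_eq_map, List.filterMap_cons, List.filterMap_map]
    simp only [odds, Nat.mul_zero, Nat.zero_add, List.getElem?_cons_zero, List.getElem?_cons_succ]
    rw [← ih]
    refine congrArg (b :: ·) ?_
    apply List.filterMap_congr
    intro k _
    have h2 : 2 * (k+1) = (2*k+1) + 1 := by ring
    simp [Function.comp, Nat.succ_eq_add_one, h2]

theorem slice?_evens {α : Type} (xs : List α) :
    PySem.List.slice? xs none none 2 = some (evens xs) := by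
  rw [← filterMap_evens]
  simp only [PySem.List.slice?, PySem.List.sliceIndices]
  norm_num
  by_cases h : 0 < xs.length
  · rw [if_pos h]
    have hc : ((↑xs.length + 2 - 1 : Int) / 2).toNat = (xs.length + 1)/2 := by omega
    rw [hc]
    apply List.filterMap_congr
    intro x _
    have hx : ((2:Int) * ↑x).toNat = 2 * x := by omega
    rw [hx]
  · have h0 : xs.length = 0 := by omega
    rw [if_neg h]
    simp [h0]

theorem slice?_odds {α : Type} (xs : List α) :
    PySem.List.slice? xs (some 1) none 2 = some (odds xs) := by
  rw [← filterMap_odds]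
  simp only [PySem.List.slice?, PySem.List.sliceIndices]
  norm_num
  by_cases h : 1 < xs.length
  · rw [if_pos h]
    have hc : (((↑xs.length : Int) - min 1 ↑xs.length + 2 - 1) / 2).toNat = xs.length/2 := by omega
    rw [hc]
    apply List.filterMap_congr
    intro x _
    have hx : ((min 1 (↑xs.length : Int)) + 2 * ↑x).toNat = 2 * x + 1 := by omega
    rw [hx]
  · have h0 : xs.length / 2 = 0 := by omega
    rw [if_neg h]
    simp [h0]

-- decoded 16-mer of the low 2n bits, MSB first
def gstr : Nat → Nat → List String
  | 0, _ => []
  | (n+1), m =>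
    (let c := (m >>> (2*n)) % 4
     if c = 0 then "A" else if c = 1 then "C" else if c = 2 then "G" else "T") :: gstr n m

theorem zip_decode : ∀ (n m : Nat),
    ((evens (fbits (2*n) m)).zip (odds (fbits (2*n) m))).map
      (fun y => pairToBase (String.ofList [y.1, y.2])) = gstr n m := by
  intro n
  induction n with
  | zero => intro m; rfl
  | succ n ih =>
    intro m
    have h2 : 2*(n+1) = (2*n+1)+1 := by ring
    rw [h2, fbits, fbits]
    simp only [evens, odds, List.zip_cons_cons, List.map_cons]
    rw [ih, gstr]
    congr 1
    -- head equality
    have hsh : m >>> (2*n+1) = (m >>> (2*n)) / 2 := Nat.shiftRight_succ m (2*n)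
    rw [hsh]
    set a := m >>> (2*n) with ha
    have hq : a % 4 = 2 * ((a/2) % 2) + a % 2 := by omega
    have h1 : (a/2) % 2 < 2 := Nat.mod_lt _ (by omega)
    have h0 : a % 2 < 2 := Nat.mod_lt _ (by omega)
    rw [hq]
    set u := (a/2) % 2
    set v := a % 2
    interval_cases u <;> interval_cases v <;> decide

theorem gstr_eq_range (n m : Nat) :
    gstr n m = (List.range n).reverse.map (fun i =>
      (let c := (m >>> (2*i)) % 4
       if c = 0 then "A" else if c = 1 then "C" else if c = 2 then "G" else "T")) := by
  induction n with
  | zero => rfl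
  | succ n ih =>
    rw [gstr, List.range_succ, List.reverse_append, ih]
    simp

theorem point_eq (m s : Nat) :
    (let c := (m >>> s) % 4
     if c = 0 then "A" else if c = 1 then "C" else if c = 2 then "G" else "T")
    = String.ofList [(PySem.Str.pyGet? "ACGT" (PySem.Int.band ((m : Int) >>> s) 3)).getD ' '] := by
  have h1 : ((m:Int) >>> s) = ((m >>> s : Nat) : Int) := by
    exact_mod_cast (Int.natCast_shiftRight m s).symm
  rw [h1, show (3:Int) = ((3:Nat):Int) from rfl, PySem.Int.band_natCast,
      Nat.and_two_pow_sub_one_eq_mod _ 2, PySem.Str.pyGet?_natCast]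
  have h4 : (m >>> s) % 4 < 4 := Nat.mod_lt _ (by omega)
  set c := (m >>> s) % 4 with hc
  interval_cases c <;> decide

-- ===== VERDICT (by name: the statement is the Claim_ definition above) =====
theorem int_to_16mer_spec : Claim_equal_int_to_16mer := by
  intro x _
  unfold Spec_int_to_16mer int_to_16mer int_to_16mer_alt
  simp only []
  have hint : PySem.Int.mod x (4^16) = x % (4^16) := by
    unfold PySem.Int.mod; rw [Int.fmod_eq_emod]; simp
  have h0 : 0 ≤ PySem.Int.mod x (4^16) := by
    rw [hint]; exact Int.emod_nonneg x (by norm_num)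
  have hlt : PySem.Int.mod x (4^16) < 2^32 := by
    rw [hint, show ((4:Int)^16 = 2^32) by norm_num]
    exact Int.emod_lt_of_pos x (by norm_num)
  obtain ⟨m, hm⟩ : ∃ m : Nat, PySem.Int.mod x (4^16) = ↑m :=
    ⟨(PySem.Int.mod x (4^16)).toNat, (Int.toNat_of_nonneg h0).symm⟩
  have hm32 : m < 2^32 := by
    have : (↑m : Int) < 2^32 := hm ▸ hlt
    exact_mod_cast this
  rw [hm]
  have hbin : (PySem.Int.pyBin (↑m)).toList = '0'::'b'::binNat m := by
    rw [PySem.Int.toList_pyBin]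
    unfold PySem.Int.toBinChars0b
    rw [if_neg (by exact_mod_cast Int.not_lt.mpr (Int.natCast_nonneg m))]
    rw [Int.toNat_natCast, toDigits_eq_binNat]
  have hslice : PySem.Chars.slice (PySem.Int.pyBin (↑m : Int)).toList (some 2) none = binNat m := by
    rw [PySem.Chars.slice_eq_listSlice, hbin,
        PySem.List.slice_from _ (by norm_num : (0:Int) ≤ 2)]
    simp
  rw [hslice]
  have hpad : List.replicate (32 - (binNat m).length) '0' ++ binNat m = fbits 32 m :=
    pad_eq_fbits 32 m (by omega) hm32
  rw [hpad, show (32:Nat) = 2*16 from rfl, slice?_evens, slice?_odds]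
  simp only [Option.getD_some]
  rw [zip_decode 16 m, gstr_eq_range]
  rw [show (List.range 16).reverse = [15,14,13,12,11,10,9,8,7,6,5,4,3,2,1,0] from by decide]
  rw [show PySem.List.pyRange 0 16 1 = [0,1,2,3,4,5,6,7,8,9,10,11,12,13,14,15] from by decide]
  refine congrArg (PySem.Str.join "") ?_
  simp only [List.map_cons, List.map_nil, List.cons.injEq, and_true]
  refine ⟨?_, ?_, ?_, ?_, ?_, ?_, ?_, ?_, ?_, ?_, ?_, ?_, ?_, ?_, ?_, ?_⟩
  · simpa using point_eq m 30
  · simpa using point_eq m 28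
  · simpa using point_eq m 26
  · simpa using point_eq m 24
  · simpa using point_eq m 22
  · simpa using point_eq m 20
  · simpa using point_eq m 18
  · simpa using point_eq m 16
  · simpa using point_eq m 14
  · simpa using point_eq m 12
  · simpa using point_eq m 10
  · simpa using point_eq m 8
  · simpa using point_eq m 6
  · simpa using point_eq m 4
  · simpa using point_eq m 2
  · simpa using point_eq m 0
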